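-- pv_equiv track=rewrite | github.com/inistory/daily_coding | 프로그래머스/level1/부족한금액계산하기.py | solution
-- ===== SOURCE A (Python) =====
-- def solution(price, money, count):
--     total_price = 0
--     for i in range(1,count+1):
--         total_price += price*i
--
--     if total_price - money < 0:
--         return 0
--     else:
--         return total_price - money
-- ===== SOURCE B (Python) =====
-- def solution(price, money, count):
--     total = price * count * (count + 1) // 2 if count > 0 else 0
--     return max(total - money, 0)
-- ===== Notes on version B (the rewrite author's own statement) =====
-- stated objective: faster
-- what changed: replaces the O(count) accumulation loop by the closed-form triangular-number formula price*count*(count+1)//2 and the branch by max(...,0)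
import Mathlib
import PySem

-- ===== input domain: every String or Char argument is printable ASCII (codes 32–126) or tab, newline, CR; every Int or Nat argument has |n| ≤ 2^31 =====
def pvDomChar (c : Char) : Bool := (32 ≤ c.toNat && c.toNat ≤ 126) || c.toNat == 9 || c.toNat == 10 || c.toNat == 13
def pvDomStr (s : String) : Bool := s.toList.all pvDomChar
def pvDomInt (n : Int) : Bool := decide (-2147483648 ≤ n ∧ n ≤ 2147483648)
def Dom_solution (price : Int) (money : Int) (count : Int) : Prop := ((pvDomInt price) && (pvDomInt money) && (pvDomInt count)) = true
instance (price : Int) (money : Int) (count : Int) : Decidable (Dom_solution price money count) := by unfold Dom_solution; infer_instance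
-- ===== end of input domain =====

-- B replaces A's O(count) summation loop by the closed-form triangular-number formula (O(1)).

-- ===== PORT A =====
def solution (price : Int) (money : Int) (count : Int) : Int :=
  let total_price := (PySem.List.pyRange 1 (count + 1) 1).foldl (fun t i => t + price * i) 0
  if total_price - money < 0 then 0 else total_price - money

-- ===== PORT B =====
def solution_alt (price : Int) (money : Int) (count : Int) : Int :=
  let total := if count > 0 then PySem.Int.floordiv (price * count * (count + 1)) 2 else 0
  max (total - money) 0

-- ===== PRECONDITION & SPEC =====
def Spec_solution (price : Int) (money : Int) (count : Int) (out : Int) : Prop := out = solution_alt price money count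
instance (price : Int) (money : Int) (count : Int) (out : Int) : Decidable (Spec_solution price money count out) := by unfold Spec_solution; infer_instance

-- ===== CLAIM (what is proved, stated in full; the proofs are below) =====
def Claim_equal_solution : Prop := ∀ (price : Int) (money : Int) (count : Int), Dom_solution price money count → Spec_solution price money count (solution price money count)

-- ===== LEMMAS AND PROOFS =====

theorem pv_sum_loop (price : Int) : ∀ (n : Nat),
    (PySem.List.pyRange 1 ((n : Int) + 1) 1).foldl (fun t i => t + price * i) 0
      = price * (n : Int) * ((n : Int) + 1) / 2 := by
  intro n
  induction n with
  | zero => simp [PySem.List.pyRange_one_eq_nil]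
  | succ k ih =>
    have h : PySem.List.pyRange 1 (((k : Int) + 1) + 1) 1
        = PySem.List.pyRange 1 ((k : Int) + 1) 1 ++ [(k : Int) + 1] := by
      exact PySem.List.pyRange_one_succ_right (by omega)
    push_cast
    rw [h, List.foldl_append, ih]
    simp only [List.foldl]
    have hk : (2 : Int) ∣ (k : Int) * ((k : Int) + 1) := (Int.even_mul_succ_self (k : Int)).two_dvd
    have hk2 : (2 : Int) ∣ ((k : Int) + 1) * ((k : Int) + 1 + 1) := (Int.even_mul_succ_self ((k : Int) + 1)).two_dvd
    obtain ⟨a, ha⟩ := hk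
    obtain ⟨b, hb⟩ := hk2
    have h1 : price * (k : Int) * ((k : Int) + 1) = 2 * (price * a) := by rw [mul_assoc, ha]; ring
    have h2 : price * ((k : Int) + 1) * ((k : Int) + 1 + 1) = 2 * (price * b) := by
      rw [mul_assoc, hb]; ring
    rw [h1, h2, Int.mul_ediv_cancel_left _ (by norm_num), Int.mul_ediv_cancel_left _ (by norm_num)]
    have hab : b = a + (k : Int) + 1 := by nlinarith [ha, hb]
    rw [hab]; ring

-- ===== VERDICT (by name: the statement is the Claim_ definition above) =====
theorem solution_spec : Claim_equal_solution := by
  intro price money count _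
  unfold Spec_solution solution solution_alt
  by_cases hc : count > 0
  · have hn : ((count.toNat : Int)) = count := Int.toNat_of_nonneg (by omega)
    simp only [if_pos hc]
    rw [← hn, pv_sum_loop price count.toNat]
    have hfd : PySem.Int.floordiv (price * (count.toNat : Int) * ((count.toNat : Int) + 1)) 2
        = price * (count.toNat : Int) * ((count.toNat : Int) + 1) / 2 := by
      simp only [PySem.Int.floordiv]
      rw [Int.fdiv_eq_ediv]; norm_num
    rw [hfd]
    omega
  · have hnil : PySem.List.pyRange 1 (count + 1) 1 = [] :=
      PySem.List.pyRange_one_eq_nil (by omega)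
    simp only [if_neg hc, hnil, List.foldl]
    omega
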